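-- pv_equiv track=rewrite | github.com/kzing20/Coding_Test | 2주/numpy사용안한코드.py | control_fish_num
-- ===== SOURCE A (Python) =====
-- from copy import deepcopy
--
-- def control_fish_num(input_matrix,N):
--     result_matrix = deepcopy(input_matrix)
--     dx = [0,0,-1,1]
--     dy = [1,-1,0,0]
--     for x in range(0,N):
--         for y in range(0,N):
--             for i in range(0,4):
--                 nextX = x + dx[i]
--                 nextY = y + dy[i]
--                 if (nextX<0) or (nextX>N-1) or (nextY<0) or (nextY>N-1):
--                     continue
--                 if (input_matrix[nextX][nextY] ==0):
--                     continue
--                 if (input_matrix[x][y]> input_matrix[nextX][nextY]):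
--                     diff = (input_matrix[x][y] - input_matrix[nextX][nextY]) //5
--                     result_matrix[x][y] -= diff
--                     result_matrix[nextX][nextY] += diff
--     return result_matrix
-- ===== SOURCE B (Python) =====
-- def control_fish_num(input_matrix, N):
--     # Pure "gather" formulation: no mutable result copy. Each output cell is a
--     # closed-form function of the input: its value plus the net flow across its
--     # (up to 4) grid edges, where flow(a -> b) = (a-b)//5 when a > b and b != 0.
--     def flow(a, b):
--         return (a - b) // 5 if a > b and b != 0 else 0
--
--     def delta(x, y):
--         s = 0
--         for nx, ny in ((x, y + 1), (x, y - 1), (x - 1, y), (x + 1, y)):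
--             if 0 <= nx < N and 0 <= ny < N:
--                 s += flow(input_matrix[nx][ny], input_matrix[x][y]) \
--                      - flow(input_matrix[x][y], input_matrix[nx][ny])
--         return s
--
--     return [[v + delta(x, y) if x < N and y < N else v
--              for y, v in enumerate(row)]
--             for x, row in enumerate(input_matrix)]
-- ===== Notes on version B (the rewrite author's own statement) =====
-- stated objective: alternative
-- what changed: A scatters in-place updates into a deepcopied result while sweeping a 4-direction stencil; B has no mutable accumulator at all: it computes each output cell independently as input value plus a closed-form net-flow delta gathered from its neighbours, building the result with a pure comprehension.
import Mathlib
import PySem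

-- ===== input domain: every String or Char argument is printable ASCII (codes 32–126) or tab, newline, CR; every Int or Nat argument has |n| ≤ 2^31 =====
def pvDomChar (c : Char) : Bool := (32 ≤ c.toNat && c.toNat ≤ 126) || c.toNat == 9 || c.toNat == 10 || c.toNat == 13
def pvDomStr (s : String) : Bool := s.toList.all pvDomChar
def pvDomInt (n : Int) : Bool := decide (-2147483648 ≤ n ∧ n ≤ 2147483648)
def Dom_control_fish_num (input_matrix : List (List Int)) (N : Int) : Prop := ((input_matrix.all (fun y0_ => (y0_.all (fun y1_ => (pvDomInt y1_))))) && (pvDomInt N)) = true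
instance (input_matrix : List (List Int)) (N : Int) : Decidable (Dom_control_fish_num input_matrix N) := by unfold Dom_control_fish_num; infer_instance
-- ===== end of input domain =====

-- B drops A's mutable deepcopied accumulator entirely: each output cell is computed
-- independently as its input value plus a gathered net-flow delta over its neighbours
-- (pure per-cell formula instead of A's in-place scatter; alternative decomposition).

-- Matrix read input_matrix[x][y]; exact for the nonneg in-range indices Pre_ guarantees.
def pvIget (m : List (List Int)) (x y : Int) : Int := (m.getD x.toNat []).getD y.toNat 0

-- result_matrix[x][y] += d; exact for the nonneg in-range indices Pre_ guarantees.
def pvAdd (m : List (List Int)) (x y : Int) (d : Int) : List (List Int) :=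
  m.modify x.toNat (fun row => row.modify y.toNat (· + d))

-- ===== PORT A =====
def control_fish_num (input_matrix : List (List Int)) (N : Int) : List (List Int) :=
  let dx : List Int := [0, 0, -1, 1]
  let dy : List Int := [1, -1, 0, 0]
  (PySem.List.pyRange 0 N 1).foldl (fun res x =>
    (PySem.List.pyRange 0 N 1).foldl (fun res y =>
      (PySem.List.pyRange 0 4 1).foldl (fun res i =>
        let nextX := x + PySem.List.pyGetD dx i 0
        let nextY := y + PySem.List.pyGetD dy i 0
        if nextX < 0 ∨ nextX > N - 1 ∨ nextY < 0 ∨ nextY > N - 1 then res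
        else if pvIget input_matrix nextX nextY = 0 then res
        else if pvIget input_matrix x y > pvIget input_matrix nextX nextY then
          let diff := PySem.Int.floordiv (pvIget input_matrix x y - pvIget input_matrix nextX nextY) 5
          pvAdd (pvAdd res x y (-diff)) nextX nextY diff
        else res) res) res) input_matrix

-- ===== PORT B =====
-- flow(a, b): what a cell of value a sends to an adjacent cell of value b
def pvFlow (a b : Int) : Int :=
  if a > b ∧ b ≠ 0 then PySem.Int.floordiv (a - b) 5 else 0

-- delta(x, y): net flow into cell (x, y) from its in-grid neighbours
def pvDelta (inp : List (List Int)) (N x y : Int) : Int :=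
  ([(x, y + 1), (x, y - 1), (x - 1, y), (x + 1, y)] : List (Int × Int)).foldl (fun s p =>
    if 0 ≤ p.1 ∧ p.1 < N ∧ 0 ≤ p.2 ∧ p.2 < N then
      s + (pvFlow (pvIget inp p.1 p.2) (pvIget inp x y)
            - pvFlow (pvIget inp x y) (pvIget inp p.1 p.2))
    else s) 0

def control_fish_num_alt (input_matrix : List (List Int)) (N : Int) : List (List Int) :=
  (PySem.List.enumerate input_matrix 0).map (fun xr =>
    (PySem.List.enumerate xr.2 0).map (fun yv =>
      if xr.1 < N ∧ yv.1 < N then yv.2 + pvDelta input_matrix N xr.1 yv.1 else yv.2))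

-- ===== PRECONDITION & SPEC =====
-- Pre_ excludes exactly the inputs on which A raises IndexError: for N ≥ 2 the N×N block
-- the loops index must exist (for N ≤ 1 no cell has an in-bounds neighbour, so A indexes nothing).
def Pre_control_fish_num (input_matrix : List (List Int)) (N : Int) : Prop :=
  N ≤ 1 ∨ (N ≤ (input_matrix.length : Int) ∧ ∀ row ∈ input_matrix.take N.toNat, N ≤ (row.length : Int))
instance (input_matrix : List (List Int)) (N : Int) : Decidable (Pre_control_fish_num input_matrix N) := by unfold Pre_control_fish_num; infer_instance

def pvWitness_control_fish_num : List (List Int) × Int := ([[1, 6], [0, 11]], 2)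

def Spec_control_fish_num (input_matrix : List (List Int)) (N : Int) (out : List (List Int)) : Prop := out = control_fish_num_alt input_matrix N
instance (input_matrix : List (List Int)) (N : Int) (out : List (List Int)) : Decidable (Spec_control_fish_num input_matrix N out) := by unfold Spec_control_fish_num; infer_instance

-- ===== CLAIM (what is proved, stated in full; the proofs are below) =====
def Claim_equal_control_fish_num : Prop := ∀ (input_matrix : List (List Int)) (N : Int), Dom_control_fish_num input_matrix N → Pre_control_fish_num input_matrix N → Spec_control_fish_num input_matrix N (control_fish_num input_matrix N)

-- ===== LEMMAS AND PROOFS =====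

-- the one-directional transfer A performs for the ordered pair (cell, neighbour)
def pvHalf (inp : List (List Int)) (res : List (List Int)) (p : (Int × Int) × (Int × Int)) :
    List (List Int) :=
  if pvIget inp p.2.1 p.2.2 = 0 then res
  else if pvIget inp p.1.1 p.1.2 > pvIget inp p.2.1 p.2.2 then
    let diff := PySem.Int.floordiv (pvIget inp p.1.1 p.1.2 - pvIget inp p.2.1 p.2.2) 5
    pvAdd (pvAdd res p.1.1 p.1.2 (-diff)) p.2.1 p.2.2 diff
  else res

-- the ordered pairs A processes at cell (x, y), in A's direction order R, L, U, D
def pvCellA (N x y : Int) : List ((Int × Int) × (Int × Int)) :=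
  (if x + 0 < 0 ∨ x + 0 > N - 1 ∨ y + 1 < 0 ∨ y + 1 > N - 1 then [] else [((x, y), (x + 0, y + 1))]) ++
  (if x + 0 < 0 ∨ x + 0 > N - 1 ∨ y + -1 < 0 ∨ y + -1 > N - 1 then [] else [((x, y), (x + 0, y + -1))]) ++
  (if x + -1 < 0 ∨ x + -1 > N - 1 ∨ y + 0 < 0 ∨ y + 0 > N - 1 then [] else [((x, y), (x + -1, y + 0))]) ++
  (if x + 1 < 0 ∨ x + 1 > N - 1 ∨ y + 0 < 0 ∨ y + 0 > N - 1 then [] else [((x, y), (x + 1, y + 0))])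

def pvLA (N : Int) : List ((Int × Int) × (Int × Int)) :=
  (PySem.List.pyRange 0 N 1).flatMap fun x =>
    (PySem.List.pyRange 0 N 1).flatMap fun y => pvCellA N x y

-- both endpoints in the N×N grid and adjacent (exactly the pairs pvLA holds)
def pvAdjP (N : Int) (p : (Int × Int) × (Int × Int)) : Prop :=
  0 ≤ p.1.1 ∧ p.1.1 ≤ N - 1 ∧ 0 ≤ p.1.2 ∧ p.1.2 ≤ N - 1 ∧
  0 ≤ p.2.1 ∧ p.2.1 ≤ N - 1 ∧ 0 ≤ p.2.2 ∧ p.2.2 ≤ N - 1 ∧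
  ((p.1.1 = p.2.1 ∧ (p.2.2 = p.1.2 + 1 ∨ p.2.2 = p.1.2 - 1)) ∨
   (p.1.2 = p.2.2 ∧ (p.2.1 = p.1.1 + 1 ∨ p.2.1 = p.1.1 - 1)))

-- the flow A moves along pair p (0 when the guard does not fire)
def pvFlowP (inp : List (List Int)) (p : (Int × Int) × (Int × Int)) : Int :=
  pvFlow (pvIget inp p.1.1 p.1.2) (pvIget inp p.2.1 p.2.2)

-- contribution of processing pair p to entry (i, j)
def pvC (inp : List (List Int)) (p : (Int × Int) × (Int × Int)) (i j : Int) : Int :=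
  (if p.1.1 = i ∧ p.1.2 = j then -(pvFlowP inp p) else 0) +
  (if p.2.1 = i ∧ p.2.2 = j then pvFlowP inp p else 0)

def pvTouch (i j : Int) (p : (Int × Int) × (Int × Int)) : Bool :=
  (p.1.1 == i && p.1.2 == j) || (p.2.1 == i && p.2.2 == j)

-- the pairs touching (i, j): for each in-grid neighbour, both orientations of that edge
def pvTP (N i j a b : Int) : List ((Int × Int) × (Int × Int)) :=
  if a < 0 ∨ a > N - 1 ∨ b < 0 ∨ b > N - 1 then []
  else [((i, j), (a, b)), ((a, b), (i, j))]

def pvT (N i j : Int) : List ((Int × Int) × (Int × Int)) :=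
  pvTP N i j i (j + 1) ++ pvTP N i j i (j - 1) ++ pvTP N i j (i - 1) j ++ pvTP N i j (i + 1) j

-- entry (i, j) of a matrix (0-default; used only at in-range indices)
def pvE (m : List (List Int)) (i j : Nat) : Int := (m.getD i []).getD j 0

-- the coordinates of p index existing entries of inp
def pvInR (inp : List (List Int)) (p : (Int × Int) × (Int × Int)) : Prop :=
  0 ≤ p.1.1 ∧ 0 ≤ p.1.2 ∧ 0 ≤ p.2.1 ∧ 0 ≤ p.2.2 ∧
  p.1.1.toNat < inp.length ∧ p.1.2.toNat < (inp.getD p.1.1.toNat []).length ∧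
  p.2.1.toNat < inp.length ∧ p.2.2.toNat < (inp.getD p.2.1.toNat []).length

lemma pvAdd_zero (m : List (List Int)) (x y : Int) : pvAdd m x y 0 = m := by
  unfold pvAdd
  apply List.ext_getElem (by simp [List.length_modify])
  intro k h1 h2
  simp only [List.getElem_modify]
  split_ifs with h
  · apply List.ext_getElem (by simp [List.length_modify])
    intro l h3 h4
    simp only [List.getElem_modify]
    split_ifs <;> simp
  · rfl

lemma pvHalf_eq (inp m : List (List Int)) (p : (Int × Int) × (Int × Int)) :
    pvHalf inp m p =
      pvAdd (pvAdd m p.1.1 p.1.2 (-(pvFlowP inp p))) p.2.1 p.2.2 (pvFlowP inp p) := by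
  unfold pvHalf pvFlowP pvFlow
  by_cases h1 : pvIget inp p.2.1 p.2.2 = 0
  · rw [if_pos h1, if_neg (by tauto)]
    simp [pvAdd_zero]
  · rw [if_neg h1]
    by_cases h2 : pvIget inp p.1.1 p.1.2 > pvIget inp p.2.1 p.2.2
    · rw [if_pos h2, if_pos ⟨h2, h1⟩]
    · rw [if_neg h2, if_neg (by tauto)]
      simp [pvAdd_zero]

lemma shape_pvAdd (m : List (List Int)) (x y d : Int) :
    (pvAdd m x y d).map List.length = m.map List.length := by
  unfold pvAdd
  apply List.ext_getElem (by simp [List.length_modify])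
  intro k h1 h2
  simp only [List.getElem_map, List.getElem_modify]
  split_ifs <;> simp [List.length_modify]

lemma shape_pvHalf (inp m : List (List Int)) (p : (Int × Int) × (Int × Int)) :
    (pvHalf inp m p).map List.length = m.map List.length := by
  rw [pvHalf_eq, shape_pvAdd, shape_pvAdd]

lemma shape_len {m inp : List (List Int)} (h : m.map List.length = inp.map List.length) :
    m.length = inp.length := by
  have := congrArg List.length h
  simpa using this

lemma shape_row {m inp : List (List Int)} (h : m.map List.length = inp.map List.length)
    (i : Nat) : (m.getD i []).length = (inp.getD i []).length := by
  by_cases hi : i < m.length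
  · have hi' : i < inp.length := shape_len h ▸ hi
    rw [List.getD_eq_getElem _ _ hi, List.getD_eq_getElem _ _ hi']
    have := congrArg (fun l => l.getD i 0) h
    simpa [List.getD_eq_getElem, hi, hi'] using this
  · have hi' : ¬ i < inp.length := shape_len h ▸ hi
    rw [List.getD_eq_default _ _ (by omega), List.getD_eq_default _ _ (by omega)]

lemma pvE_pvAdd (m : List (List Int)) (x y d : Int) (i j : Nat)
    (hx : 0 ≤ x) (hy : 0 ≤ y) :
    pvE (pvAdd m x y d) i j =
      pvE m i j + (if x = (i : Int) ∧ y = (j : Int) ∧ i < m.length ∧ j < (m.getD i []).length then d else 0) := by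
  unfold pvE pvAdd
  simp only [List.getD, List.getElem?_modify]
  by_cases hi : i < m.length
  · simp only [List.getElem?_eq_getElem hi, Option.map_eq_map, Option.map_some, Option.getD_some]
    by_cases hxi : x.toNat = i
    · rw [if_pos hxi]
      simp only [List.getElem?_modify, Option.map_eq_map]
      by_cases hj : j < m[i].length
      · simp only [List.getElem?_eq_getElem hj, Option.map_some, Option.getD_some]
        split_ifs <;> omega
      · simp only [List.getElem?_eq_none (show m[i].length ≤ j by omega), Option.map_none,
          Option.getD_none]
        rw [if_neg (by omega)]
        omega
    · rw [if_neg hxi, if_neg (by omega)]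
      omega
  · simp only [List.getElem?_eq_none (show m.length ≤ i by omega), Option.map_eq_map, Option.map_none,
      Option.getD_none]
    rw [if_neg (by omega)]
    omega

lemma pvE_pvHalf (inp m : List (List Int)) (p : (Int × Int) × (Int × Int)) (i j : Nat)
    (hsh : m.map List.length = inp.map List.length) (hp : pvInR inp p) :
    pvE (pvHalf inp m p) i j = pvE m i j + pvC inp p (i : Int) (j : Int) := by
  obtain ⟨h1, h2, h3, h4, h5, h6, h7, h8⟩ := hp
  rw [pvHalf_eq, pvE_pvAdd _ _ _ _ _ _ h3 h4, pvE_pvAdd _ _ _ _ _ _ h1 h2]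
  unfold pvC
  have hl := shape_len hsh
  have hr1 := shape_row hsh p.1.1.toNat
  have hr2 := shape_row hsh p.2.1.toNat
  have e1 : (p.1.1 = (i : Int) ∧ p.1.2 = (j : Int) ∧ i < m.length ∧ j < (m.getD i []).length)
      ↔ (p.1.1 = (i : Int) ∧ p.1.2 = (j : Int)) := by
    constructor
    · rintro ⟨a, b, -, -⟩; exact ⟨a, b⟩
    · rintro ⟨a, b⟩
      refine ⟨a, b, ?_, ?_⟩
      · omega
      · have : i = p.1.1.toNat := by omega
        subst this
        have hj : j = p.1.2.toNat := by omega
        rw [shape_row hsh]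
        omega
  have e2 : (p.2.1 = (i : Int) ∧ p.2.2 = (j : Int) ∧ i < (pvAdd m p.1.1 p.1.2 (-(pvFlowP inp p))).length ∧ j < ((pvAdd m p.1.1 p.1.2 (-(pvFlowP inp p))).getD i []).length)
      ↔ (p.2.1 = (i : Int) ∧ p.2.2 = (j : Int)) := by
    have hsh2 : (pvAdd m p.1.1 p.1.2 (-(pvFlowP inp p))).map List.length = inp.map List.length := by
      rw [shape_pvAdd]; exact hsh
    constructor
    · rintro ⟨a, b, -, -⟩; exact ⟨a, b⟩
    · rintro ⟨a, b⟩
      refine ⟨a, b, ?_, ?_⟩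
      · have := shape_len hsh2; omega
      · have : i = p.2.1.toNat := by omega
        subst this
        rw [shape_row hsh2]
        omega
  rw [if_congr e1 rfl rfl, if_congr e2 rfl rfl]
  ring

lemma pvE_foldl (inp : List (List Int)) (L : List ((Int × Int) × (Int × Int)))
    (m : List (List Int)) (i j : Nat)
    (hsh : m.map List.length = inp.map List.length) (hin : ∀ p ∈ L, pvInR inp p) :
    pvE (L.foldl (pvHalf inp) m) i j =
      pvE m i j + (L.map (fun p => pvC inp p (i : Int) (j : Int))).sum := by
  induction L generalizing m with
  | nil => simp
  | cons p L ih =>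
    simp only [List.foldl_cons, List.map_cons, List.sum_cons]
    rw [ih (pvHalf inp m p) (by rw [shape_pvHalf]; exact hsh) (fun q hq => hin q (List.mem_cons_of_mem _ hq)),
        pvE_pvHalf inp m p i j hsh (hin p List.mem_cons_self)]
    ring

lemma shape_foldl (inp : List (List Int)) (L : List ((Int × Int) × (Int × Int)))
    (m : List (List Int)) (hsh : m.map List.length = inp.map List.length) :
    (L.foldl (pvHalf inp) m).map List.length = inp.map List.length := by
  induction L generalizing m with
  | nil => exact hsh
  | cons p L ih => exact ih _ (by rw [shape_pvHalf]; exact hsh)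

-- one direction of A's stencil, as a fold over a zero-or-one element list
lemma dir_eq (inp : List (List Int)) (N x y nx ny : Int) (res : List (List Int)) :
    (if nx < 0 ∨ nx > N - 1 ∨ ny < 0 ∨ ny > N - 1 then res
     else if pvIget inp nx ny = 0 then res
     else if pvIget inp x y > pvIget inp nx ny then
       pvAdd (pvAdd res x y (-PySem.Int.floordiv (pvIget inp x y - pvIget inp nx ny) 5)) nx ny
         (PySem.Int.floordiv (pvIget inp x y - pvIget inp nx ny) 5)
     else res)
    = ((if nx < 0 ∨ nx > N - 1 ∨ ny < 0 ∨ ny > N - 1 then []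
        else [((x, y), (nx, ny))]) : List ((Int × Int) × (Int × Int))).foldl (pvHalf inp) res := by
  by_cases h : nx < 0 ∨ nx > N - 1 ∨ ny < 0 ∨ ny > N - 1
  · simp only [if_pos h, List.foldl_nil]
  · simp only [if_neg h, List.foldl_cons, List.foldl_nil]
    rfl

-- A's inner direction loop at cell (x, y) is the fold of pvHalf over pvCellA
lemma cellA_eq (inp : List (List Int)) (N x y : Int) (res : List (List Int)) :
    (PySem.List.pyRange 0 4 1).foldl (fun res i =>
        let nextX := x + PySem.List.pyGetD ([0, 0, -1, 1] : List Int) i 0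
        let nextY := y + PySem.List.pyGetD ([1, -1, 0, 0] : List Int) i 0
        if nextX < 0 ∨ nextX > N - 1 ∨ nextY < 0 ∨ nextY > N - 1 then res
        else if pvIget inp nextX nextY = 0 then res
        else if pvIget inp x y > pvIget inp nextX nextY then
          let diff := PySem.Int.floordiv (pvIget inp x y - pvIget inp nextX nextY) 5
          pvAdd (pvAdd res x y (-diff)) nextX nextY diff
        else res) res
      = (pvCellA N x y).foldl (pvHalf inp) res := by
  rw [show PySem.List.pyRange 0 4 1 = [0, 1, 2, 3] from by decide]
  simp only [List.foldl_cons, List.foldl_nil,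
    show PySem.List.pyGetD ([0, 0, -1, 1] : List Int) (0 : Int) 0 = 0 from by decide,
    show PySem.List.pyGetD ([0, 0, -1, 1] : List Int) (1 : Int) 0 = 0 from by decide,
    show PySem.List.pyGetD ([0, 0, -1, 1] : List Int) (2 : Int) 0 = -1 from by decide,
    show PySem.List.pyGetD ([0, 0, -1, 1] : List Int) (3 : Int) 0 = 1 from by decide,
    show PySem.List.pyGetD ([1, -1, 0, 0] : List Int) (0 : Int) 0 = 1 from by decide,
    show PySem.List.pyGetD ([1, -1, 0, 0] : List Int) (1 : Int) 0 = -1 from by decide,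
    show PySem.List.pyGetD ([1, -1, 0, 0] : List Int) (2 : Int) 0 = 0 from by decide,
    show PySem.List.pyGetD ([1, -1, 0, 0] : List Int) (3 : Int) 0 = 0 from by decide]
  rw [dir_eq, dir_eq, dir_eq, dir_eq]
  simp only [pvCellA, List.foldl_append]

lemma A_eq (inp : List (List Int)) (N : Int) :
    control_fish_num inp N = (pvLA N).foldl (pvHalf inp) inp := by
  unfold control_fish_num pvLA
  simp only [List.foldl_flatMap]
  apply PySem.List.foldl_congr_mem
  intro res x _
  apply PySem.List.foldl_congr_mem
  intro res' y _
  exact cellA_eq inp N x y res'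

lemma mem_pvLA (N : Int) (p : (Int × Int) × (Int × Int)) : p ∈ pvLA N ↔ pvAdjP N p := by
  obtain ⟨⟨a, b⟩, c, d⟩ := p
  simp only [pvLA, pvCellA, List.mem_flatMap, PySem.List.mem_pyRange_one, List.mem_append,
    List.mem_ite_nil_left, List.mem_singleton, pvAdjP]
  constructor
  · rintro ⟨x, hx, y, hy, h⟩
    simp only [Prod.mk.injEq] at h
    omega
  · rintro ⟨h1, h2, h3, h4, h5, h6, h7, h8, h9⟩
    exact ⟨a, by omega, b, by omega, by simp only [Prod.mk.injEq, true_and]; omega⟩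

-- a flatMap is duplicate-free when each block is and a key read off every element names its block
lemma nodup_flatMap_key {α γ : Type} (l : List γ) (f : γ → List α) (k : α → γ)
    (hl : l.Nodup) (hf : ∀ c ∈ l, (f c).Nodup)
    (hk : ∀ c ∈ l, ∀ p ∈ f c, k p = c) : (l.flatMap f).Nodup := by
  rw [List.nodup_flatMap]
  refine ⟨hf, ?_⟩
  refine hl.imp_of_mem ?_
  intro c c' hc hc' hne p hp hp'
  exact hne ((hk c hc p hp) ▸ (hk c' hc' p hp'))

lemma nodup_pvCellA (N x y : Int) : (pvCellA N x y).Nodup := by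
  unfold pvCellA
  split_ifs <;> simp [Prod.ext_iff]

lemma nodup_pvLA (N : Int) : (pvLA N).Nodup := by
  unfold pvLA
  refine nodup_flatMap_key _ _ (fun p => p.1.1) (PySem.List.nodup_pyRange_one 0 N) ?_ ?_
  · intro x _
    refine nodup_flatMap_key _ _ (fun p => p.1.2) (PySem.List.nodup_pyRange_one 0 N)
      (fun y _ => nodup_pvCellA N x y) ?_
    intro y _ p hp
    simp only [pvCellA, List.mem_append, List.mem_ite_nil_left, List.mem_singleton] at hp
    rcases hp with ((⟨-, rfl⟩ | ⟨-, rfl⟩) | ⟨-, rfl⟩) | ⟨-, rfl⟩ <;> rfl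
  · intro x _ p hp
    simp only [List.mem_flatMap, pvCellA, List.mem_append, List.mem_ite_nil_left,
      List.mem_singleton] at hp
    obtain ⟨y, -, hp⟩ := hp
    rcases hp with ((⟨-, rfl⟩ | ⟨-, rfl⟩) | ⟨-, rfl⟩) | ⟨-, rfl⟩ <;> rfl

lemma nodup_pvT (N i j : Int) : (pvT N i j).Nodup := by
  unfold pvT pvTP
  split_ifs <;> simp [Prod.ext_iff] <;> omega

lemma mem_pvT (N i j : Int) (hi : 0 ≤ i ∧ i ≤ N - 1 ∧ 0 ≤ j ∧ j ≤ N - 1)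
    (p : (Int × Int) × (Int × Int)) :
    p ∈ pvT N i j ↔ pvAdjP N p ∧ pvTouch i j p = true := by
  obtain ⟨⟨a, b⟩, c, d⟩ := p
  simp only [pvT, pvTP, pvAdjP, pvTouch, List.mem_append, List.mem_ite_nil_left,
    List.mem_cons, List.not_mem_nil, or_false, Prod.mk.injEq,
    Bool.or_eq_true, Bool.and_eq_true, beq_iff_eq]
  omega

lemma pvC_zero (inp : List (List Int)) (p : (Int × Int) × (Int × Int)) (i j : Int)
    (h : ¬ pvTouch i j p = true) : pvC inp p i j = 0 := by
  simp only [pvTouch, Bool.or_eq_true, Bool.and_eq_true, beq_iff_eq, not_or, not_and] at h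
  unfold pvC
  rw [if_neg (by tauto), if_neg (by tauto)]
  ring

-- restrict the contribution sum to the pairs touching (i, j)
lemma sum_pvLA_filter (inp : List (List Int)) (N i j : Int) :
    ((pvLA N).map (fun p => pvC inp p i j)).sum =
      (((pvLA N).filter (pvTouch i j)).map (fun p => pvC inp p i j)).sum := by
  have hperm := (List.filter_append_perm (pvTouch i j) (pvLA N)).map
    (fun p => pvC inp p i j)
  rw [← hperm.sum_eq, List.map_append, List.sum_append]
  have : (((pvLA N).filter (fun p => !(pvTouch i j p))).map (fun p => pvC inp p i j)).sum = 0 := by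
    apply List.sum_eq_zero
    intro x hx
    simp only [List.mem_map, List.mem_filter] at hx
    obtain ⟨p, ⟨-, hp⟩, rfl⟩ := hx
    exact pvC_zero inp p i j (by simpa using hp)
  omega

lemma sum_pvTP (inp : List (List Int)) (N i j a b : Int) (hne : ¬ (a = i ∧ b = j)) :
    ((pvTP N i j a b).map (fun p => pvC inp p i j)).sum =
      (if 0 ≤ a ∧ a < N ∧ 0 ≤ b ∧ b < N then
        pvFlow (pvIget inp a b) (pvIget inp i j) - pvFlow (pvIget inp i j) (pvIget inp a b)
      else 0) := by
  unfold pvTP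
  by_cases hg : a < 0 ∨ a > N - 1 ∨ b < 0 ∨ b > N - 1
  · rw [if_pos hg, if_neg (by omega)]
    simp
  · rw [if_neg hg, if_pos (by omega)]
    simp only [List.map_cons, List.map_nil, List.sum_cons, List.sum_nil, pvC, pvFlowP]
    rw [if_neg hne, if_neg hne]
    simp only [and_self, if_true]
    ring

-- the total contribution to an in-grid cell (i, j) is B's pvDelta
lemma sum_pvT_eq_delta (inp : List (List Int)) (N i j : Int) :
    ((pvT N i j).map (fun p => pvC inp p i j)).sum = pvDelta inp N i j := by
  unfold pvT
  simp only [List.map_append, List.sum_append]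
  rw [sum_pvTP inp N i j i (j + 1) (by omega), sum_pvTP inp N i j i (j - 1) (by omega),
      sum_pvTP inp N i j (i - 1) j (by omega), sum_pvTP inp N i j (i + 1) j (by omega)]
  unfold pvDelta
  simp only [List.foldl_cons, List.foldl_nil]
  split_ifs <;> ring

lemma sum_pvLA_eq_delta (inp : List (List Int)) (N i j : Int)
    (hij : 0 ≤ i ∧ i ≤ N - 1 ∧ 0 ≤ j ∧ j ≤ N - 1) :
    ((pvLA N).map (fun p => pvC inp p i j)).sum = pvDelta inp N i j := by
  rw [sum_pvLA_filter, ← sum_pvT_eq_delta inp N i j]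
  have hperm : ((pvLA N).filter (pvTouch i j)).Perm (pvT N i j) := by
    refine (List.perm_ext_iff_of_nodup ((nodup_pvLA N).filter _) (nodup_pvT N i j)).mpr ?_
    intro p
    rw [List.mem_filter, mem_pvLA, mem_pvT N i j hij p]
  exact (hperm.map _).sum_eq

lemma sum_pvLA_zero (inp : List (List Int)) (N i j : Int)
    (hij : ¬ (i < N ∧ j < N)) (_h0 : 0 ≤ i) (_h0' : 0 ≤ j) :
    ((pvLA N).map (fun p => pvC inp p i j)).sum = 0 := by
  apply List.sum_eq_zero
  intro x hx
  simp only [List.mem_map] at hx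
  obtain ⟨p, hp, rfl⟩ := hx
  have := (mem_pvLA N p).mp hp
  unfold pvAdjP at this
  apply pvC_zero
  simp only [pvTouch, Bool.or_eq_true, Bool.and_eq_true, beq_iff_eq, not_or, not_and]
  constructor <;> intro <;> omega

lemma inR_of_pre (inp : List (List Int)) (N : Int) (hpre : Pre_control_fish_num inp N) :
    ∀ p ∈ pvLA N, pvInR inp p := by
  intro p hp
  have hadj := (mem_pvLA N p).mp hp
  unfold pvAdjP at hadj
  have hN2 : 2 ≤ N := by omega
  rcases hpre with h1 | ⟨hlen, hrows⟩
  · omega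
  · have hrow : ∀ (c : Int), 0 ≤ c → c ≤ N - 1 → c.toNat < inp.length ∧
        N ≤ ((inp.getD c.toNat []).length : Int) := by
      intro c hc1 hc2
      have hc : c.toNat < inp.length := by omega
      refine ⟨hc, ?_⟩
      have hmem : inp.getD c.toNat [] ∈ inp.take N.toNat := by
        rw [List.getD_eq_getElem _ _ hc]
        have hlt : c.toNat < (inp.take N.toNat).length := by
          simp [List.length_take]; omega
        have : (inp.take N.toNat)[c.toNat]'hlt = inp[c.toNat]'hc := List.getElem_take
        rw [← this]
        exact List.getElem_mem hlt
      exact hrows _ hmem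
    obtain ⟨q1, q2⟩ := hrow p.1.1 (by omega) (by omega)
    obtain ⟨q3, q4⟩ := hrow p.2.1 (by omega) (by omega)
    exact ⟨by omega, by omega, by omega, by omega, q1, by omega, q3, by omega⟩

-- lists are equal when their shapes and all in-range pvE entries agree
lemma ext_of_pvE (m1 m2 : List (List Int)) (hsh : m1.map List.length = m2.map List.length)
    (h : ∀ i j : Nat, i < m2.length → j < (m2.getD i []).length → pvE m1 i j = pvE m2 i j) :
    m1 = m2 := by
  apply List.ext_getElem (shape_len hsh)
  intro i h1 h2
  apply List.ext_getElem
  · have := shape_row hsh i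
    rwa [List.getD_eq_getElem _ _ h1, List.getD_eq_getElem _ _ h2] at this
  · intro j h3 h4
    have := h i j h2 (by rw [List.getD_eq_getElem _ _ h2]; exact h4)
    unfold pvE at this
    rwa [List.getD_eq_getElem _ _ h1, List.getD_eq_getElem _ _ h3,
      List.getD_eq_getElem _ _ h2, List.getD_eq_getElem _ _ h4] at this

-- B's output, entry by entry
lemma alt_shape (inp : List (List Int)) (N : Int) :
    (control_fish_num_alt inp N).map List.length = inp.map List.length := by
  unfold control_fish_num_alt
  apply List.ext_getElem
  · simp [PySem.List.length_enumerate]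
  · intro k h1 h2
    simp [PySem.List.length_enumerate, PySem.List.getElem_enumerate]

lemma alt_entry (inp : List (List Int)) (N : Int) (i j : Nat)
    (hi : i < inp.length) (hj : j < (inp.getD i []).length) :
    pvE (control_fish_num_alt inp N) i j =
      pvE inp i j + (if (i : Int) < N ∧ (j : Int) < N then pvDelta inp N i j else 0) := by
  rw [List.getD_eq_getElem _ _ hi] at hj
  unfold control_fish_num_alt pvE
  simp only [List.getD, List.getElem?_map, PySem.List.getElem?_enumerate,
    List.getElem?_eq_getElem hi, Option.map_some, Option.getD_some, zero_add,
    List.getElem?_eq_getElem hj]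
  split_ifs <;> omega

-- ===== VERDICT (by name: the statement is the Claim_ definition above) =====
theorem control_fish_num_spec : Claim_equal_control_fish_num := by
  intro inp N _ hpre
  unfold Spec_control_fish_num
  rw [A_eq]
  apply ext_of_pvE
  · rw [shape_foldl inp _ inp rfl, alt_shape]
  · intro i j h1 h2
    have hi : i < inp.length := by have := shape_len (alt_shape inp N); omega
    have hj : j < (inp.getD i []).length := by have := shape_row (alt_shape inp N) i; omega
    rw [pvE_foldl inp (pvLA N) inp i j rfl (inR_of_pre inp N hpre),
      alt_entry inp N i j hi hj]
    by_cases hc : (i : Int) < N ∧ (j : Int) < N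
    · rw [sum_pvLA_eq_delta inp N i j ⟨by omega, by omega, by omega, by omega⟩, if_pos hc]
    · rw [sum_pvLA_zero inp N i j hc (by omega) (by omega), if_neg hc]
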